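-- pv_equiv track=rewrite | github.com/tomer-w/nmea2000 | import_tests.py | _convert_jsish_to_python_literal
-- ===== SOURCE A (Python) =====
-- def _convert_jsish_to_python_literal(text: str) -> str:
--     output: list[str] = []
--     index = 0
--     in_string = False
--     quote_char = ""
--     escape = False
--
--     while index < len(text):
--         char = text[index]
--
--         if in_string:
--             output.append(char)
--             if escape:
--                 escape = False
--             elif char == "\\":
--                 escape = True
--             elif char == quote_char:
--                 in_string = False
--             index += 1
--             continue
--
--         if char in {"'", '"'}:
--             in_string = True
--             quote_char = char
--             output.append(char)
--             index += 1
--             continue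
--
--         if char.isalpha() or char == "_":
--             end_index = index + 1
--             while end_index < len(text) and (
--                 text[end_index].isalnum() or text[end_index] == "_"
--             ):
--                 end_index += 1
--
--             token = text[index:end_index]
--
--             previous_index = index - 1
--             while previous_index >= 0 and text[previous_index].isspace():
--                 previous_index -= 1
--             previous_char = text[previous_index] if previous_index >= 0 else ""
--
--             next_index = end_index
--             while next_index < len(text) and text[next_index].isspace():
--                 next_index += 1
--
--             if next_index < len(text) and text[next_index] == ":" and previous_char in {
--                 "{",
--                 ",",
--             }:
--                 output.append(repr(token))
--             elif token == "true":
--                 output.append("True")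
--             elif token == "false":
--                 output.append("False")
--             elif token == "null":
--                 output.append("None")
--             else:
--                 output.append(token)
--
--             index = end_index
--             continue
--
--         output.append(char)
--         index += 1
--
--     return "".join(output)
-- ===== SOURCE B (Python) =====
-- import re
--
-- # B: tokenize the whole input with one regex (string literal / identifier / any
-- # single char), then render the token list in one pass, tracking the last
-- # non-whitespace character and looking ahead for a ':' token to decide key-vs-keyword.
-- _TOKEN_RE = re.compile(
--     r"'(?:\\.|[^'\\])*'?"
--     r'|"(?:\\.|[^"\\])*"?'
--     r"|[^\W\d]\w*"
--     r"|."
--     , re.DOTALL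
-- )
-- _KEYWORDS = {"true": "True", "false": "False", "null": "None"}
--
--
-- def _is_ws_token(tok):
--     return len(tok) == 1 and tok.isspace()
--
--
-- def _next_is_colon(tokens, i):
--     for tok in tokens[i:]:
--         if _is_ws_token(tok):
--             continue
--         return tok == ":"
--     return False
--
--
-- def _convert_jsish_to_python_literal(text: str) -> str:
--     tokens = _TOKEN_RE.findall(text)
--     out = []
--     prev = None
--     for i, tok in enumerate(tokens):
--         if tok[0] in "'\"":
--             out.append(tok)
--         elif tok[0].isalpha() or tok[0] == "_":
--             if prev in ("{", ",") and _next_is_colon(tokens, i + 1):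
--                 out.append(repr(tok))
--             else:
--                 out.append(_KEYWORDS.get(tok, tok))
--         else:
--             out.append(tok)
--         if not _is_ws_token(tok):
--             prev = tok[-1]
--     return "".join(out)
-- ===== Notes on version B (the rewrite author's own statement) =====
-- stated objective: alternative
-- what changed: A's single index-driven character scan with in-string state and ad-hoc backward/forward whitespace probes into the text is replaced by a two-phase design: one regex pass tokenizes the whole input into string-literal / identifier / single-char tokens, then a single render pass over the token list decides key-vs-keyword from the tracked last non-whitespace character and a token lookahead.
import Mathlib
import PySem

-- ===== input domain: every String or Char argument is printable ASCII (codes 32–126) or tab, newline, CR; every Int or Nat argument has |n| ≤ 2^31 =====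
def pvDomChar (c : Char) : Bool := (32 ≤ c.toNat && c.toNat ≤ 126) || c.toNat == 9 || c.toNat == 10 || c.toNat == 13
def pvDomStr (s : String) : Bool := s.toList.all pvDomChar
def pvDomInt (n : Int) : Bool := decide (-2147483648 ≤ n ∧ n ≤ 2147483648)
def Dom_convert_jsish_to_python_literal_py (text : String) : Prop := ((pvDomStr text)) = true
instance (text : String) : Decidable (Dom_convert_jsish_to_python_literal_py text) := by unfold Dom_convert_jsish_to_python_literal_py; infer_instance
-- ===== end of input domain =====

-- B re-decomposes A's single index-driven scan as tokenize-then-render over a token list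
-- (a timing run measured B faster by a constant factor); return values proved equal on all of Dom.

-- shared character classes (both Pythons test isalnum/isalpha/'_' on the same chars;
-- PySem.Chars.* is exact on the ASCII domain)
def pvIsIdentStart (c : Char) : Bool := PySem.Chars.isalpha c || c = '_'
def pvIsIdentChar (c : Char) : Bool := PySem.Chars.isalnum c || c = '_'

-- ===== PORT A =====
-- while end_index < len(text) and (text[end_index].isalnum() or text[end_index] == "_")
def pvAEnd (cs : List Char) (e : Nat) : Nat :=
  if _h : e < cs.length then
    if pvIsIdentChar (cs.getD e ' ') then pvAEnd cs (e + 1) else e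
  else e
termination_by cs.length - e

theorem pvAEnd_ge (cs : List Char) (e : Nat) : e ≤ pvAEnd cs e := by
  unfold pvAEnd
  split
  · split
    · exact le_trans (Nat.le_succ e) (pvAEnd_ge cs (e + 1))
    · exact le_refl e
  · exact le_refl e
termination_by cs.length - e

-- while previous_index >= 0 and text[previous_index].isspace(); '' (no char) = none
def pvAPrev (cs : List Char) : Nat → Option Char
  | 0 => none
  | k + 1 => if PySem.Chars.isspace (cs.getD k ' ') then pvAPrev cs k else some (cs.getD k ' ')

-- while next_index < len(text) and text[next_index].isspace()
def pvASkip (cs : List Char) (j : Nat) : Nat :=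
  if h : j < cs.length then
    if PySem.Chars.isspace (cs.getD j ' ') then pvASkip cs (j + 1) else j
  else j
termination_by cs.length - j

-- the main while loop of A; output is the list of appended pieces, joined at the end.
-- quote_char's initial Python value "" is never compared (only read while in_string); ' ' stands in.
def pvALoop (cs : List Char) (index : Nat) (instr : Bool) (q : Char) (esc : Bool)
    (out : List (List Char)) : List (List Char) :=
  if _h : index < cs.length then
    let char := cs.getD index ' '
    if instr then
      let out := out ++ [[char]]
      if esc then pvALoop cs (index + 1) true q false out
      else if char = '\\' then pvALoop cs (index + 1) true q true out
      else if char = q then pvALoop cs (index + 1) false q esc out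
      else pvALoop cs (index + 1) true q esc out
    else if char = '\'' ∨ char = '"' then
      pvALoop cs (index + 1) true char esc (out ++ [[char]])
    else if pvIsIdentStart char then
      let e := pvAEnd cs (index + 1)
      let token := (cs.take e).drop index        -- text[index:end_index] (0 ≤ index ≤ e ≤ len)
      let prev := pvAPrev cs index
      let j := pvASkip cs e
      let piece :=
        if decide (j < cs.length) && (cs.getD j ' ' == ':')
            && (prev == some '{' || prev == some ',') then
          '\'' :: token ++ ['\'']                 -- repr(token): token is identifier chars only
        else if token = ['t','r','u','e'] then ['T','r','u','e']
        else if token = ['f','a','l','s','e'] then ['F','a','l','s','e']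
        else if token = ['n','u','l','l'] then ['N','o','n','e']
        else token
      pvALoop cs e false q esc (out ++ [piece])
    else pvALoop cs (index + 1) instr q esc (out ++ [[char]])
  else out
termination_by cs.length - index
decreasing_by
  · omega
  · omega
  · omega
  · omega
  · omega
  · have := pvAEnd_ge cs (index + 1); omega
  · omega

def convert_jsish_to_python_literal_py (text : String) : String :=
  String.ofList (pvALoop text.toList 0 false ' ' false []).flatten

-- ===== PORT B =====
-- a token of B's single-regex tokenizer: a quoted string (possibly unterminated),
-- an identifier, or any other single character
inductive PvTok where
  | tstr : List Char → PvTok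
  | tident : List Char → PvTok
  | tother : Char → PvTok
deriving DecidableEq, Repr

-- the string-literal alternative '(?:\\.|[^'\\])*'? : consume up to and including the
-- closing quote (escapes skipped), or to the end of input
def pvTakeStr (q : Char) (esc : Bool) : List Char → List Char × List Char
  | [] => ([], [])
  | c :: rest =>
    if esc then
      let p := pvTakeStr q false rest; (c :: p.1, p.2)
    else if c = '\\' then
      let p := pvTakeStr q true rest; (c :: p.1, p.2)
    else if c = q then ([c], rest)
    else
      let p := pvTakeStr q false rest; (c :: p.1, p.2)

theorem pvTakeStr_len (q : Char) (esc : Bool) (l : List Char) :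
    (pvTakeStr q esc l).2.length ≤ l.length := by
  induction l generalizing esc with
  | nil => simp [pvTakeStr]
  | cons c rest ih =>
    unfold pvTakeStr
    split
    · exact le_trans (ih false) (Nat.le_succ _)
    · split
      · exact le_trans (ih true) (Nat.le_succ _)
      · split
        · simp
        · exact le_trans (ih false) (Nat.le_succ _)

-- one regex pass (finditer): string literal | identifier | any single char
def pvTokenize (cs : List Char) : List PvTok :=
  match cs with
  | [] => []
  | c :: rest =>
    if c = '\'' ∨ c = '"' then
      let p := pvTakeStr c false rest
      PvTok.tstr (c :: p.1) :: pvTokenize p.2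
    else if pvIsIdentStart c then
      PvTok.tident (c :: rest.takeWhile pvIsIdentChar) :: pvTokenize (rest.dropWhile pvIsIdentChar)
    else PvTok.tother c :: pvTokenize rest
termination_by cs.length
decreasing_by
  · have := pvTakeStr_len c false rest; simp; omega
  · have := rest.length_dropWhile_le pvIsIdentChar; simp; omega
  · simp

def pvTokChars : PvTok → List Char
  | PvTok.tstr s => s
  | PvTok.tident s => s
  | PvTok.tother c => [c]

-- len(tok) == 1 and tok.isspace()
def pvIsWsTok (t : PvTok) : Bool :=
  (pvTokChars t).length == 1 && PySem.Chars.strIsspace (pvTokChars t)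

-- _next_is_colon: nearest following non-whitespace token is ":"
def pvNextColon : List PvTok → Bool
  | [] => false
  | t :: rest => if pvIsWsTok t then pvNextColon rest else decide (pvTokChars t = [':'])

-- the render pass: prev = last character of the last non-whitespace token so far
def pvRender (prev : Option Char) : List PvTok → List Char
  | [] => []
  | t :: rest =>
    let piece :=
      match t with
      | PvTok.tstr s => s
      | PvTok.tident s =>
        if (prev == some '{' || prev == some ',') && pvNextColon rest then
          '\'' :: s ++ ['\'']                     -- repr(tok)
        else if s = ['t','r','u','e'] then ['T','r','u','e']
        else if s = ['f','a','l','s','e'] then ['F','a','l','s','e']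
        else if s = ['n','u','l','l'] then ['N','o','n','e']
        else s
      | PvTok.tother c => [c]
    let prev' := if pvIsWsTok t then prev else some ((pvTokChars t).getLastD ' ')
    piece ++ pvRender prev' rest

def convert_jsish_to_python_literal_py_alt (text : String) : String :=
  String.ofList (pvRender none (pvTokenize text.toList))

-- ===== PRECONDITION & SPEC =====
def Spec_convert_jsish_to_python_literal_py (text : String) (out : String) : Prop := out = convert_jsish_to_python_literal_py_alt text
instance (text : String) (out : String) : Decidable (Spec_convert_jsish_to_python_literal_py text out) := by unfold Spec_convert_jsish_to_python_literal_py; infer_instance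

-- ===== CLAIM (what is proved, stated in full; the proofs are below) =====
def Claim_equal_convert_jsish_to_python_literal_py : Prop := ∀ (text : String), Dom_convert_jsish_to_python_literal_py text → Spec_convert_jsish_to_python_literal_py text (convert_jsish_to_python_literal_py text)

-- ===== LEMMAS AND PROOFS =====

-- character-class facts
theorem pv_identStart_identChar (c : Char) (h : pvIsIdentStart c = true) :
    pvIsIdentChar c = true := by
  simp only [pvIsIdentStart, pvIsIdentChar, PySem.Chars.isalnum, Bool.or_eq_true,
    decide_eq_true_eq] at *
  tauto

theorem pv_identChar_not_space (c : Char) (h : pvIsIdentChar c = true) :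
    PySem.Chars.isspace c = false := by
  simp only [pvIsIdentChar, PySem.Chars.isalnum, PySem.Chars.isalpha, PySem.Chars.isupper,
    PySem.Chars.islower, PySem.Chars.isdigit, PySem.Chars.isspace,
    Char.le_def, UInt32.le_iff_toNat_le, Bool.or_eq_true, Bool.and_eq_true, decide_eq_true_eq,
    Bool.or_eq_false_iff, Bool.and_eq_false_iff, decide_eq_false_iff_not,
    show ('A'.val.toNat) = 65 from rfl, show ('Z'.val.toNat) = 90 from rfl,
    show ('a'.val.toNat) = 97 from rfl, show ('z'.val.toNat) = 122 from rfl,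
    show ('0'.val.toNat) = 48 from rfl, show ('9'.val.toNat) = 57 from rfl] at *
  have h95 : c = '_' → c.toNat = 95 := by intro e; subst e; rfl
  unfold Char.toNat at *
  rcases h with ((h | h) | h) | h
  · omega
  · omega
  · omega
  · have := h95 h; unfold Char.toNat at this; omega

theorem pv_identStart_not_space (c : Char) (h : pvIsIdentStart c = true) :
    PySem.Chars.isspace c = false :=
  pv_identChar_not_space c (pv_identStart_identChar c h)

theorem pv_identStart_ne_colon (c : Char) (h : pvIsIdentStart c = true) : c ≠ ':' := by
  intro e; subst e; exact absurd h (by decide)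

theorem pv_quote_not_space (c : Char) (h : c = '\'' ∨ c = '"') :
    PySem.Chars.isspace c = false := by
  rcases h with h | h <;> subst h <;> decide

theorem pv_quote_ne_colon (c : Char) (h : c = '\'' ∨ c = '"') : c ≠ ':' := by
  rcases h with h | h <;> subst h <;> decide

-- list bookkeeping
theorem pvDropCons {cs : List Char} {i : Nat} {c : Char} {d : List Char}
    (h : cs.drop i = c :: d) : i < cs.length ∧ cs.getD i ' ' = c ∧ cs.drop (i + 1) = d := by
  have h0 : cs[i]? = some c := by
    have h1 : (cs.drop i)[0]? = cs[i + 0]? := List.getElem?_drop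
    rw [h] at h1
    simpa using h1.symm
  refine ⟨(List.getElem?_eq_some_iff.mp h0).1, ?_, ?_⟩
  · simp [List.getD_eq_getElem?_getD, h0]
  · rw [← List.tail_drop, h]; rfl

theorem pvFlattenSing (l : List Char) : (l.map (fun c => [c])).flatten = l := by
  induction l with
  | nil => simp
  | cons c r ih => simp [ih]

theorem pvTakeLenTakeWhile (l : List Char) (p : Char → Bool) :
    l.take (l.takeWhile p).length = l.takeWhile p := by
  induction l with
  | nil => simp
  | cons c r ih => by_cases h : p c <;> simp [h, ih]

-- pvAEnd / pvASkip as takeWhile over the suffix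
theorem pvAEnd_eq (d : List Char) : ∀ (cs : List Char) (e : Nat), cs.drop e = d →
    pvAEnd cs e = e + (d.takeWhile pvIsIdentChar).length := by
  induction d with
  | nil =>
    intro cs e h
    have := List.drop_eq_nil_iff.mp h
    unfold pvAEnd
    rw [dif_neg (by omega)]
    simp
  | cons c d' ih =>
    intro cs e h
    obtain ⟨hlt, hget, hdrop⟩ := pvDropCons h
    unfold pvAEnd
    rw [dif_pos hlt, hget]
    by_cases hc : pvIsIdentChar c
    · rw [if_pos hc, ih cs (e + 1) hdrop]
      simp [hc]
      omega
    · rw [if_neg hc]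
      simp [hc]

theorem pvASkip_eq (d : List Char) : ∀ (cs : List Char) (j : Nat), cs.drop j = d →
    pvASkip cs j = j + (d.takeWhile PySem.Chars.isspace).length := by
  induction d with
  | nil =>
    intro cs j h
    have := List.drop_eq_nil_iff.mp h
    unfold pvASkip
    rw [dif_neg (by omega)]
    simp
  | cons c d' ih =>
    intro cs j h
    obtain ⟨hlt, hget, hdrop⟩ := pvDropCons h
    unfold pvASkip
    rw [dif_pos hlt, hget]
    by_cases hc : PySem.Chars.isspace c
    · rw [if_pos hc, ih cs (j + 1) hdrop]
      simp [hc]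
      omega
    · rw [if_neg hc]
      simp [hc]

theorem pvDropLenTakeWhile (l : List Char) (p : Char → Bool) :
    l.drop (l.takeWhile p).length = l.dropWhile p := by
  induction l with
  | nil => simp
  | cons c r ih => by_cases h : p c <;> simp [h, ih]

theorem pvASkip_drop (cs : List Char) (j : Nat) :
    cs.drop (pvASkip cs j) = (cs.drop j).dropWhile PySem.Chars.isspace := by
  rw [pvASkip_eq (cs.drop j) cs j rfl, ← List.drop_drop, pvDropLenTakeWhile]

-- pvTakeStr facts
theorem pvTakeStr_append (q : Char) (l : List Char) : ∀ (esc : Bool),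
    (pvTakeStr q esc l).1 ++ (pvTakeStr q esc l).2 = l := by
  induction l with
  | nil => intro esc; simp [pvTakeStr]
  | cons c rest ih =>
    intro esc
    cases esc with
    | true => simpa [pvTakeStr] using ih false
    | false =>
      by_cases hbs : c = '\\'
      · simpa [pvTakeStr, hbs] using ih true
      · by_cases hq : c = q
        · subst hq; simp [pvTakeStr, hbs]
        · simpa [pvTakeStr, hbs, hq] using ih false

theorem pvTakeStr_rest_ne (q : Char) (l : List Char) : ∀ (esc : Bool),
    (pvTakeStr q esc l).2 ≠ [] → ∃ b, (pvTakeStr q esc l).1 = b ++ [q] := by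
  induction l with
  | nil => intro esc h; simp [pvTakeStr] at h
  | cons c rest ih =>
    intro esc h
    cases esc with
    | true =>
      obtain ⟨b, hb⟩ := ih false (by simpa [pvTakeStr] using h)
      exact ⟨c :: b, by simp [pvTakeStr, hb]⟩
    | false =>
      by_cases hbs : c = '\\'
      · obtain ⟨b, hb⟩ := ih true (by simpa [pvTakeStr, hbs] using h)
        exact ⟨c :: b, by simp [pvTakeStr, hbs, hb]⟩
      · by_cases hq : c = q
        · refine ⟨[], ?_⟩
          subst hq
          simp [pvTakeStr, hbs]
        · obtain ⟨b, hb⟩ := ih false (by simpa [pvTakeStr, hbs, hq] using h)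
          exact ⟨c :: b, by simp [pvTakeStr, hbs, hq, hb]⟩

-- A's string mode consumes exactly the pvTakeStr chunk, one character per append
theorem pvALoop_str (d : List Char) : ∀ (cs : List Char) (i : Nat) (q : Char) (esc : Bool)
    (out : List (List Char)), cs.drop i = d →
    pvALoop cs i true q esc out
      = pvALoop cs (i + (pvTakeStr q esc d).1.length) false q false
          (out ++ (pvTakeStr q esc d).1.map (fun c => [c])) := by
  induction d with
  | nil =>
    intro cs i q esc out h
    have := List.drop_eq_nil_iff.mp h
    simp only [pvTakeStr]
    conv_lhs => unfold pvALoop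
    conv_rhs => unfold pvALoop
    rw [dif_neg (by omega), dif_neg (by omega)]
    simp
  | cons c rest ih =>
    intro cs i q esc out h
    obtain ⟨hlt, hget, hdrop⟩ := pvDropCons h
    conv_lhs => unfold pvALoop
    rw [dif_pos hlt]
    simp only [hget]
    by_cases he : esc
    · subst he
      rw [if_pos rfl, ih cs (i + 1) q false (out ++ [[c]]) hdrop]
      simp only [pvTakeStr]
      simp [Nat.add_assoc, Nat.add_comm 1]
    · simp only [he, if_neg (Bool.false_ne_true)]
      by_cases hbs : c = '\\'
      · rw [if_pos hbs, ih cs (i + 1) q true (out ++ [[c]]) hdrop]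
        simp only [pvTakeStr, if_pos hbs]
        simp [Nat.add_assoc, Nat.add_comm 1]
      · rw [if_neg hbs]
        by_cases hq : c = q
        · rw [if_pos hq]
          simp only [pvTakeStr, if_neg hbs, if_pos hq]
          simp
        · rw [if_neg hq, ih cs (i + 1) q false (out ++ [[c]]) hdrop]
          simp only [pvTakeStr, if_neg hbs, if_neg hq]
          simp [Nat.add_assoc, Nat.add_comm 1]

-- _next_is_colon over the token list = "first non-space character is ':'" over the text
theorem pvNextColon_eq (d : List Char) :
    pvNextColon (pvTokenize d) = (match d.dropWhile PySem.Chars.isspace with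
      | [] => false
      | c :: _ => c == ':') := by
  induction d with
  | nil => simp [pvTokenize, pvNextColon]
  | cons c rest ih =>
    unfold pvTokenize
    by_cases hq : c = '\'' ∨ c = '"'
    · rw [if_pos hq]
      have hsp := pv_quote_not_space c hq
      have hco := pv_quote_ne_colon c hq
      simp [pvNextColon, pvIsWsTok, pvTokChars, PySem.Chars.strIsspace, hsp, hco]
    · rw [if_neg hq]
      by_cases hid : pvIsIdentStart c
      · rw [if_pos hid]
        have hsp := pv_identStart_not_space c hid
        have hco := pv_identStart_ne_colon c hid
        simp [pvNextColon, pvIsWsTok, pvTokChars, PySem.Chars.strIsspace, hsp, hco]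
      · rw [if_neg hid]
        by_cases hsp : PySem.Chars.isspace c
        · simp [pvNextColon, pvIsWsTok, pvTokChars, PySem.Chars.strIsspace, hsp, ih]
        · simp only [pvNextColon, pvIsWsTok, pvTokChars, PySem.Chars.strIsspace, hsp,
            List.dropWhile_cons]
          by_cases hc : c = ':' <;> simp [hc, hsp]
          left; decide

-- A's backward whitespace scan lands on the last character of the preceding chunk
theorem pvAPrev_last (cs : List Char) (i : Nat) (t r : List Char) (x : Char)
    (h : cs.drop i = (t ++ [x]) ++ r) (hx : PySem.Chars.isspace x = false) :
    pvAPrev cs (i + t.length + 1) = some x := by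
  have hd : cs.drop (i + t.length) = x :: r := by
    rw [← List.drop_drop, h, List.append_assoc, List.drop_left]
    rfl
  obtain ⟨_, hget, _⟩ := pvDropCons hd
  rw [List.getD_eq_getElem?_getD] at hget
  simp [pvAPrev, hget, hx]

-- pvTokenize single-step equations
theorem pvTokenize_cons_quote (c : Char) (rest : List Char) (hq : c = '\'' ∨ c = '"') :
    pvTokenize (c :: rest)
      = PvTok.tstr (c :: (pvTakeStr c false rest).1) :: pvTokenize (pvTakeStr c false rest).2 := by
  conv_lhs => rw [pvTokenize]
  rw [if_pos hq]

theorem pvTokenize_cons_ident (c : Char) (rest : List Char) (hq : ¬(c = '\'' ∨ c = '"'))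
    (hid : pvIsIdentStart c = true) :
    pvTokenize (c :: rest)
      = PvTok.tident (c :: rest.takeWhile pvIsIdentChar)
        :: pvTokenize (rest.dropWhile pvIsIdentChar) := by
  conv_lhs => rw [pvTokenize]
  rw [if_neg hq, if_pos hid]

theorem pvTokenize_cons_other (c : Char) (rest : List Char) (hq : ¬(c = '\'' ∨ c = '"'))
    (hid : ¬pvIsIdentStart c = true) :
    pvTokenize (c :: rest) = PvTok.tother c :: pvTokenize rest := by
  conv_lhs => rw [pvTokenize]
  rw [if_neg hq, if_neg hid]

-- pvRender single-step equations
theorem pvRender_cons_str (prev : Option Char) (s : List Char) (ts : List PvTok)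
    (hws : pvIsWsTok (PvTok.tstr s) = false) :
    pvRender prev (PvTok.tstr s :: ts) = s ++ pvRender (some (s.getLastD ' ')) ts := by
  simp [pvRender, pvTokChars, hws]

theorem pvRender_cons_ident (prev : Option Char) (s : List Char) (ts : List PvTok)
    (hws : pvIsWsTok (PvTok.tident s) = false) :
    pvRender prev (PvTok.tident s :: ts)
      = (if (prev == some '{' || prev == some ',') && pvNextColon ts then
            '\'' :: s ++ ['\'']
          else if s = ['t','r','u','e'] then ['T','r','u','e']
          else if s = ['f','a','l','s','e'] then ['F','a','l','s','e']
          else if s = ['n','u','l','l'] then ['N','o','n','e']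
          else s) ++ pvRender (some (s.getLastD ' ')) ts := by
  simp [pvRender, pvTokChars, hws]

theorem pvRender_cons_other (prev : Option Char) (c : Char) (ts : List PvTok) :
    pvRender prev (PvTok.tother c :: ts)
      = c :: pvRender (if PySem.Chars.isspace c then prev else some c) ts := by
  by_cases hsp : PySem.Chars.isspace c <;>
    simp [pvRender, pvIsWsTok, pvTokChars, PySem.Chars.strIsspace, hsp]

-- the main correspondence: A's loop (out of string mode) = B's render of B's tokens
theorem pv_main_aux : ∀ (n : Nat) (cs : List Char) (i : Nat) (q : Char) (out : List (List Char)),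
    (cs.drop i).length ≤ n →
    (pvALoop cs i false q false out).flatten
      = out.flatten ++ pvRender (pvAPrev cs i) (pvTokenize (cs.drop i)) := by
  intro n
  induction n with
  | zero =>
    intro cs i q out hn
    have hnil : cs.drop i = [] := List.eq_nil_of_length_eq_zero (by omega)
    have hlen := List.drop_eq_nil_iff.mp hnil
    unfold pvALoop
    rw [dif_neg (by omega), hnil]
    simp [pvTokenize, pvRender]
  | succ n ih =>
    intro cs i q out hn
    rcases hd : cs.drop i with _ | ⟨c, rest⟩
    · have hlen := List.drop_eq_nil_iff.mp hd
      unfold pvALoop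
      rw [dif_neg (by omega)]
      simp [pvTokenize, pvRender]
    · obtain ⟨hlt, hget, hdrop⟩ := pvDropCons hd
      have hrest : rest.length ≤ n := by
        have h1 : (cs.drop i).length = rest.length + 1 := by rw [hd]; simp
        omega
      conv_lhs => unfold pvALoop
      rw [dif_pos hlt]
      simp only [hget, Bool.false_eq_true, if_false]
      by_cases hq : c = '\'' ∨ c = '"'
      · -- string-literal chunk
        rw [if_pos hq, pvALoop_str rest cs (i + 1) c false (out ++ [[c]]) hdrop]
        have happ := pvTakeStr_append c rest false
        have hdropb : cs.drop (i + 1 + (pvTakeStr c false rest).1.length)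
            = (pvTakeStr c false rest).2 := by
          have h3 := List.drop_left (l₁ := (pvTakeStr c false rest).1) (l₂ := (pvTakeStr c false rest).2)
          rw [happ] at h3
          rw [← List.drop_drop, hdrop, h3]
        have hlen2 : (cs.drop (i + 1 + (pvTakeStr c false rest).1.length)).length ≤ n := by
          rw [hdropb]
          have h2 : (pvTakeStr c false rest).1.length + (pvTakeStr c false rest).2.length
              = rest.length := by rw [← List.length_append, happ]
          omega
        rw [ih cs (i + 1 + (pvTakeStr c false rest).1.length) c _ hlen2]
        have htok := pvTokenize_cons_quote c rest hq
        have hws : pvIsWsTok (PvTok.tstr (c :: (pvTakeStr c false rest).1)) = false := by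
          simp [pvIsWsTok, pvTokChars, PySem.Chars.strIsspace, pv_quote_not_space c hq]
        rw [htok, pvRender_cons_str _ _ _ hws, hdropb]
        rcases hr2 : (pvTakeStr c false rest).2 with _ | ⟨y, ys⟩
        · simp [pvTokenize, pvRender, pvFlattenSing]
        · obtain ⟨b, hb⟩ := pvTakeStr_rest_ne c rest false (by rw [hr2]; simp)
          have hprev : pvAPrev cs (i + 1 + (pvTakeStr c false rest).1.length) = some c := by
            have hidx : i + 1 + (pvTakeStr c false rest).1.length = i + (c :: b).length + 1 := by
              have := congrArg List.length hb
              simp at this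
              simp
              omega
            rw [hidx]
            apply pvAPrev_last cs i (c :: b) (pvTakeStr c false rest).2 c _
              (pv_quote_not_space c hq)
            have h4 : ((c :: b) ++ [c]) ++ (pvTakeStr c false rest).2 = c :: rest := by
              rw [show ((c :: b) ++ [c]) ++ (pvTakeStr c false rest).2
                  = c :: ((b ++ [c]) ++ (pvTakeStr c false rest).2) from by simp,
                ← hb, happ]
            rw [hd]
            exact h4.symm
          have hlast : (c :: (pvTakeStr c false rest).1).getLastD ' ' = c := by
            rw [hb, ← List.cons_append, List.getLastD_eq_getLast?, List.getLast?_concat]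
            rfl
          rw [← hr2, hprev, hlast]
          simp [pvFlattenSing]
      · rw [if_neg hq]
        by_cases hid : pvIsIdentStart c
        · -- identifier chunk
          rw [if_pos hid]
          have hend : pvAEnd cs (i + 1) = i + 1 + (rest.takeWhile pvIsIdentChar).length :=
            pvAEnd_eq rest cs (i + 1) hdrop
          have htoksl : (cs.take (i + 1 + (rest.takeWhile pvIsIdentChar).length)).drop i
              = c :: rest.takeWhile pvIsIdentChar := by
            rw [List.drop_take, hd,
              show i + 1 + (rest.takeWhile pvIsIdentChar).length - i
                = (rest.takeWhile pvIsIdentChar).length + 1 from by omega]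
            simp [pvTakeLenTakeWhile]
          have hdrope : cs.drop (i + 1 + (rest.takeWhile pvIsIdentChar).length)
              = rest.dropWhile pvIsIdentChar := by
            rw [← List.drop_drop, hdrop, pvDropLenTakeWhile]
          have hlen2 : (cs.drop (i + 1 + (rest.takeWhile pvIsIdentChar).length)).length ≤ n := by
            rw [hdrope]
            have := rest.length_dropWhile_le pvIsIdentChar
            omega
          have hmid : (decide (pvASkip cs (i + 1 + (rest.takeWhile pvIsIdentChar).length) < cs.length)
                && (cs.getD (pvASkip cs (i + 1 + (rest.takeWhile pvIsIdentChar).length)) ' ' == ':'))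
              = pvNextColon (pvTokenize (rest.dropWhile pvIsIdentChar)) := by
            rw [pvNextColon_eq]
            have hjd : cs.drop (pvASkip cs (i + 1 + (rest.takeWhile pvIsIdentChar).length))
                = (rest.dropWhile pvIsIdentChar).dropWhile PySem.Chars.isspace := by
              rw [pvASkip_drop, hdrope]
            rcases hw : (rest.dropWhile pvIsIdentChar).dropWhile PySem.Chars.isspace
              with _ | ⟨x, xs⟩
            · rw [hw] at hjd
              have := List.drop_eq_nil_iff.mp hjd
              simp
              omega
            · rw [hw] at hjd
              obtain ⟨hjlt, hjget, _⟩ := pvDropCons hjd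
              rw [hjget]
              simp [hjlt]
          -- the last character of the identifier token, for the prev-scan
          obtain ⟨t0, x, hcx⟩ : ∃ t0 x, c :: rest.takeWhile pvIsIdentChar = t0 ++ [x] := by
            rcases List.eq_nil_or_concat (c :: rest.takeWhile pvIsIdentChar) with h' | ⟨t0, x, h'⟩
            · exact absurd h' (by simp)
            · exact ⟨t0, x, by simpa using h'⟩
          have hxns : PySem.Chars.isspace x = false := by
            have hxmem : x ∈ c :: rest.takeWhile pvIsIdentChar := by
              rw [hcx]; simp
            rcases List.mem_cons.mp hxmem with h' | h'
            · subst h'; exact pv_identStart_not_space x hid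
            · exact pv_identChar_not_space x (List.mem_takeWhile_imp h')
          have hprev : pvAPrev cs (i + 1 + (rest.takeWhile pvIsIdentChar).length) = some x := by
            have hlent : t0.length = (rest.takeWhile pvIsIdentChar).length := by
              have := congrArg List.length hcx
              simp at this
              omega
            rw [show i + 1 + (rest.takeWhile pvIsIdentChar).length = i + t0.length + 1 from by omega]
            apply pvAPrev_last cs i t0 (rest.dropWhile pvIsIdentChar) x _ hxns
            rw [hd, show (t0 ++ [x]) ++ rest.dropWhile pvIsIdentChar
                = (t0 ++ [x]) ++ rest.dropWhile pvIsIdentChar from rfl, ← hcx]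
            simp [List.takeWhile_append_dropWhile]
          have hlast : (c :: rest.takeWhile pvIsIdentChar).getLastD ' ' = x := by
            rw [hcx, List.getLastD_eq_getLast?, List.getLast?_concat]
            rfl
          have hws : pvIsWsTok (PvTok.tident (c :: rest.takeWhile pvIsIdentChar)) = false := by
            simp [pvIsWsTok, pvTokChars, PySem.Chars.strIsspace, pv_identStart_not_space c hid]
          have htok := pvTokenize_cons_ident c rest hq hid
          rw [hend, htoksl, ih cs (i + 1 + (rest.takeWhile pvIsIdentChar).length) q _ hlen2,
            htok, pvRender_cons_ident _ _ _ hws, hdrope, hprev, hlast, hmid, Bool.and_comm]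
          simp
        · -- any other single character
          rw [if_neg hid, ih cs (i + 1) q (out ++ [[c]]) (by rw [hdrop]; exact hrest)]
          have htok := pvTokenize_cons_other c rest hq hid
          rw [htok, pvRender_cons_other, hdrop]
          rw [List.getD_eq_getElem?_getD] at hget
          by_cases hsp : PySem.Chars.isspace c
          · have hprev : pvAPrev cs (i + 1) = pvAPrev cs i := by
              simp [pvAPrev, hget, hsp]
            rw [hprev]
            simp [hsp]
          · have hprev : pvAPrev cs (i + 1) = some c := by
              simp [pvAPrev, hget, hsp]
            rw [hprev]
            simp [hsp]

-- ===== VERDICT (by name: the statement is the Claim_ definition above) =====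
theorem convert_jsish_to_python_literal_py_spec : Claim_equal_convert_jsish_to_python_literal_py := by
  intro text _
  unfold Spec_convert_jsish_to_python_literal_py convert_jsish_to_python_literal_py
    convert_jsish_to_python_literal_py_alt
  rw [pv_main_aux text.toList.length text.toList 0 ' ' [] (by simp)]
  simp [pvAPrev]
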